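-- pv_equiv track=rewrite | github.com/MTHZ-01/Auto-software-installer-for-windows- | Assets.py | app_version
-- ===== SOURCE A (Python) =====
-- def app_version(link: str) -> str:
--     link = link.split('/')[-1]
--     version = ''
--     number_met = False
--     for char in link:
--         if 48 <= ord(char) <= 57 or (char == '.' and number_met):
--             version += char
--             number_met = True
--         elif number_met and not char == '.':
--             break
--
--     return version.strip('.')
-- ===== SOURCE B (Python) =====
-- def app_version(link: str) -> str:
--     tail = link.split('/')[-1]
--     n = len(tail)
--     i = 0
--     while i < n and not ('0' <= tail[i] <= '9'):
--         i += 1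
--     j = i
--     while j < n and tail[j] in '0123456789.':
--         j += 1
--     return tail[i:j].strip('.')
-- ===== Notes on version B (the rewrite author's own statement) =====
-- stated objective: alternative
-- what changed: Replaces the flag-driven character loop (number_met state machine with append/break) by a two-phase index scan: advance one index to the first digit, advance a second over the run of digits and dots, then return the stripped slice between them.
import Mathlib
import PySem

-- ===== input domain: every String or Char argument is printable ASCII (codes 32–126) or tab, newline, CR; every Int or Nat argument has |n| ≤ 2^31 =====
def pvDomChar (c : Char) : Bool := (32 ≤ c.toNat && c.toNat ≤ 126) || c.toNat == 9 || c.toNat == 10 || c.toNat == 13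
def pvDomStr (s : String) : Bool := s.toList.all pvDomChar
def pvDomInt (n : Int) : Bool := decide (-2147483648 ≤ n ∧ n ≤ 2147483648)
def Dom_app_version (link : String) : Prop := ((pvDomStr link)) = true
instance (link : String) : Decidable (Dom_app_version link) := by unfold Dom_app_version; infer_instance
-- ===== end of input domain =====

-- B replaces A's flag-driven character loop (number_met state machine with break) by a
-- two-phase index scan: find the first digit, extend over the digit/dot run, slice and strip.

-- ===== PORT A =====
-- tail = link.split('/')[-1]  (identical first line of both Pythons; the list is never empty)
def pvLastSeg (link : String) : List Char :=
  PySem.List.pyGetD (PySem.Chars.splitOn link.toList ['/']) (-1) []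

-- the for-loop of A: state = (version, number_met); returning means Python's `break` or loop end
def pvLoopA : List Char → List Char → Bool → List Char
  | [], version, _ => version
  | c :: rest, version, numberMet =>
    if (48 ≤ c.toNat ∧ c.toNat ≤ 57) ∨ (c = '.' ∧ numberMet = true) then
      pvLoopA rest (version ++ [c]) true
    else if numberMet = true ∧ ¬ c = '.' then version
    else pvLoopA rest version numberMet

def app_version (link : String) : String :=
  String.ofList (PySem.Chars.stripChars (pvLoopA (pvLastSeg link) [] false) ['.'])

-- ===== PORT B =====
-- first while loop of B: advance i while tail[i] is not a digit
def pvFindDigitB (cs : List Char) (i : Nat) : Nat :=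
  if h : i < cs.length then
    if ¬ ('0' ≤ cs[i] ∧ cs[i] ≤ '9') then pvFindDigitB cs (i + 1) else i
  else i
termination_by cs.length - i

-- second while loop of B: advance j while tail[j] is in '0123456789.'
def pvScanRunB (cs : List Char) (j : Nat) : Nat :=
  if h : j < cs.length then
    if cs[j] ∈ ['0','1','2','3','4','5','6','7','8','9','.'] then pvScanRunB cs (j + 1) else j
  else j
termination_by cs.length - j

def app_version_alt (link : String) : String :=
  String.ofList (PySem.Chars.stripChars
    (PySem.List.slice (pvLastSeg link)
      (some ((pvFindDigitB (pvLastSeg link) 0 : Nat) : Int))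
      (some ((pvScanRunB (pvLastSeg link) (pvFindDigitB (pvLastSeg link) 0) : Nat) : Int))) ['.'])

-- ===== PRECONDITION & SPEC =====
def Spec_app_version (link : String) (out : String) : Prop := out = app_version_alt link
instance (link : String) (out : String) : Decidable (Spec_app_version link out) := by unfold Spec_app_version; infer_instance

-- ===== CLAIM (what is proved, stated in full; the proofs are below) =====
def Claim_equal_app_version : Prop := ∀ (link : String), Dom_app_version link → Spec_app_version link (app_version link)

-- ===== LEMMAS AND PROOFS =====

theorem char_toNat_inj (a b : Char) (h : a.toNat = b.toNat) : a = b :=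
  Char.ext (UInt32.toNat_inj.mp h)

theorem digit_iff (c : Char) : (48 ≤ c.toNat ∧ c.toNat ≤ 57) ↔ ('0' ≤ c ∧ c ≤ '9') := by
  rw [Char.le_def, Char.le_def, UInt32.le_iff_toNat_le, UInt32.le_iff_toNat_le]
  have h : c.toNat = c.val.toNat := rfl
  rw [show ('0':Char).val.toNat = 48 from rfl, show ('9':Char).val.toNat = 57 from rfl, ← h]

theorem mem_digitsDot_iff (c : Char) :
    c ∈ ['0','1','2','3','4','5','6','7','8','9','.'] ↔ ((48 ≤ c.toNat ∧ c.toNat ≤ 57) ∨ c = '.') := by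
  constructor
  · intro h
    fin_cases h <;> first | exact Or.inr rfl | exact Or.inl (by decide)
  · rintro (⟨h1, h2⟩ | h)
    · rcases (by omega : c.toNat = 48 ∨ c.toNat = 49 ∨ c.toNat = 50 ∨ c.toNat = 51 ∨ c.toNat = 52 ∨
        c.toNat = 53 ∨ c.toNat = 54 ∨ c.toNat = 55 ∨ c.toNat = 56 ∨ c.toNat = 57) with
        h|h|h|h|h|h|h|h|h|h
      · rw [char_toNat_inj c '0' h]; decide
      · rw [char_toNat_inj c '1' h]; decide
      · rw [char_toNat_inj c '2' h]; decide
      · rw [char_toNat_inj c '3' h]; decide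
      · rw [char_toNat_inj c '4' h]; decide
      · rw [char_toNat_inj c '5' h]; decide
      · rw [char_toNat_inj c '6' h]; decide
      · rw [char_toNat_inj c '7' h]; decide
      · rw [char_toNat_inj c '8' h]; decide
      · rw [char_toNat_inj c '9' h]; decide
    · rw [h]; decide

-- Bool-valued tests used to describe the two scans
def pvNotDig (c : Char) : Bool := !decide ('0' ≤ c ∧ c ≤ '9')
def pvQ (c : Char) : Bool := decide (c ∈ ['0','1','2','3','4','5','6','7','8','9','.'])

theorem loopA_true (cs : List Char) : ∀ v, pvLoopA cs v true = v ++ cs.takeWhile pvQ := by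
  induction cs with
  | nil => intro v; simp [pvLoopA]
  | cons c r ih =>
    intro v
    rw [show pvLoopA (c :: r) v true =
        (if (48 ≤ c.toNat ∧ c.toNat ≤ 57) ∨ (c = '.' ∧ true = true) then pvLoopA r (v ++ [c]) true
         else if true = true ∧ ¬ c = '.' then v else pvLoopA r v true) from rfl]
    by_cases hq : pvQ c = true
    · have hcond : (48 ≤ c.toNat ∧ c.toNat ≤ 57) ∨ (c = '.' ∧ true = true) := by
        rcases (mem_digitsDot_iff c).mp (by simpa [pvQ] using hq) with h | h
        · exact Or.inl h
        · exact Or.inr ⟨h, rfl⟩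
      rw [if_pos hcond, ih, List.takeWhile_cons, if_pos hq]
      simp
    · have hnd : ¬ ((48 ≤ c.toNat ∧ c.toNat ≤ 57) ∨ (c = '.' ∧ true = true)) := by
        intro h
        apply hq
        simp only [pvQ, decide_eq_true_eq]
        rcases h with h | ⟨h, _⟩
        · exact (mem_digitsDot_iff c).mpr (Or.inl h)
        · exact (mem_digitsDot_iff c).mpr (Or.inr h)
      have hdot : ¬ c = '.' := fun h => hnd (Or.inr ⟨h, rfl⟩)
      rw [if_neg hnd, if_pos (⟨rfl, hdot⟩ : true = true ∧ ¬ c = '.'), List.takeWhile_cons,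
        if_neg (by simp [hq])]
      simp

def pvTailRun (cs : List Char) : List Char :=
  match cs.dropWhile pvNotDig with
  | [] => []
  | c :: r => c :: r.takeWhile pvQ

theorem loopA_false (cs : List Char) : ∀ v, pvLoopA cs v false = v ++ pvTailRun cs := by
  induction cs with
  | nil => intro v; simp [pvLoopA, pvTailRun]
  | cons c r ih =>
    intro v
    rw [show pvLoopA (c :: r) v false =
        (if (48 ≤ c.toNat ∧ c.toNat ≤ 57) ∨ (c = '.' ∧ false = true) then pvLoopA r (v ++ [c]) true
         else if false = true ∧ ¬ c = '.' then v else pvLoopA r v false) from rfl]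
    by_cases hd : (48 ≤ c.toNat ∧ c.toNat ≤ 57)
    · have hnd : pvNotDig c = false := by
        simp only [pvNotDig, Bool.not_eq_false', decide_eq_true_eq]
        exact (digit_iff c).mp hd
      rw [if_pos (Or.inl hd), loopA_true]
      unfold pvTailRun
      rw [List.dropWhile_cons, if_neg (by simp [hnd])]
      simp
    · have hnd : pvNotDig c = true := by
        simp only [pvNotDig, Bool.not_eq_true', decide_eq_false_iff_not]
        exact fun h => hd ((digit_iff c).mpr h)
      have hc1 : ¬ ((48 ≤ c.toNat ∧ c.toNat ≤ 57) ∨ (c = '.' ∧ false = true)) := by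
        rintro (h | ⟨_, h⟩)
        · exact hd h
        · exact Bool.false_ne_true h
      have hc2 : ¬ (false = true ∧ ¬ c = '.') := by rintro ⟨h, _⟩; exact Bool.false_ne_true h
      rw [if_neg hc1, if_neg hc2, ih]
      unfold pvTailRun
      rw [List.dropWhile_cons, if_pos (by simp [hnd])]

theorem findB_eq (cs : List Char) : ∀ i, pvFindDigitB cs i = i + ((cs.drop i).takeWhile pvNotDig).length := by
  intro i
  fun_induction pvFindDigitB cs i with
  | case1 i h hnd ih =>
    rw [List.drop_eq_getElem_cons h, List.takeWhile_cons,
      if_pos (show pvNotDig cs[i] = true by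
        simp only [pvNotDig, Bool.not_eq_true', decide_eq_false_iff_not]; exact hnd)]
    simp only [List.length_cons] at *
    omega
  | case2 i h hd =>
    rw [List.drop_eq_getElem_cons h, List.takeWhile_cons,
      if_neg (show ¬ pvNotDig cs[i] = true by
        simp only [pvNotDig, Bool.not_eq_true', decide_eq_false_iff_not, not_not]
        exact not_not.mp hd)]
    simp
  | case3 i h =>
    rw [List.drop_eq_nil_of_le (by omega)]
    simp

theorem scanB_eq (cs : List Char) : ∀ j, pvScanRunB cs j = j + ((cs.drop j).takeWhile pvQ).length := by
  intro j
  fun_induction pvScanRunB cs j with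
  | case1 j h hq ih =>
    rw [List.drop_eq_getElem_cons h, List.takeWhile_cons,
      if_pos (show pvQ cs[j] = true by simp [pvQ, hq])]
    simp only [List.length_cons] at *
    omega
  | case2 j h hq =>
    rw [List.drop_eq_getElem_cons h, List.takeWhile_cons,
      if_neg (show ¬ pvQ cs[j] = true by simp [pvQ, hq])]
    simp
  | case3 j h =>
    rw [List.drop_eq_nil_of_le (by omega)]
    simp

theorem dropWhile_head_false {p : Char → Bool} : ∀ (l : List Char) c r, l.dropWhile p = c :: r → p c = false := by
  intro l
  induction l with
  | nil => intro c r h; simp at h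
  | cons a t ih =>
    intro c r h
    by_cases ha : p a = true
    · rw [List.dropWhile_cons, if_pos ha] at h; exact ih c r h
    · rw [List.dropWhile_cons, if_neg ha] at h
      cases h; simpa using ha

theorem drop_len_takeWhile (p : Char → Bool) (l : List Char) : l.drop (l.takeWhile p).length = l.dropWhile p := by
  induction l with
  | nil => rfl
  | cons a t ih =>
    by_cases h : p a = true <;> simp [List.dropWhile_cons, h, ih]

theorem take_len_takeWhile (p : Char → Bool) (l : List Char) : l.take (l.takeWhile p).length = l.takeWhile p := by
  induction l with
  | nil => rfl
  | cons a t ih =>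
    by_cases h : p a = true <;> simp [h, ih]

theorem main_eq (cs : List Char) :
    pvLoopA cs [] false =
      PySem.List.slice cs (some ((pvFindDigitB cs 0 : Nat) : Int))
        (some ((pvScanRunB cs (pvFindDigitB cs 0) : Nat) : Int)) := by
  rw [PySem.List.slice_natCast, loopA_false, List.nil_append]
  have hi : pvFindDigitB cs 0 = (cs.takeWhile pvNotDig).length := by
    rw [findB_eq]; simp
  have hdrop : cs.drop (pvFindDigitB cs 0) = cs.dropWhile pvNotDig := by
    rw [hi, drop_len_takeWhile]
  have hj : pvScanRunB cs (pvFindDigitB cs 0) =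
      pvFindDigitB cs 0 + ((cs.dropWhile pvNotDig).takeWhile pvQ).length := by
    rw [scanB_eq, hdrop]
  rw [hj, hdrop, Nat.add_sub_cancel_left, take_len_takeWhile]
  unfold pvTailRun
  cases hdw : cs.dropWhile pvNotDig with
  | nil => rfl
  | cons c r =>
    have hc : pvNotDig c = false := dropWhile_head_false cs c r hdw
    have hq : pvQ c = true := by
      simp only [pvNotDig, Bool.not_eq_false', decide_eq_true_eq] at hc
      simp only [pvQ, decide_eq_true_eq]
      exact (mem_digitsDot_iff c).mpr (Or.inl ((digit_iff c).mpr hc))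
    rw [List.takeWhile_cons, if_pos hq]

-- ===== VERDICT (by name: the statement is the Claim_ definition above) =====
theorem app_version_spec : Claim_equal_app_version := by
  intro link _
  unfold Spec_app_version app_version app_version_alt
  rw [main_eq]
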